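-- pv_equiv track=rewrite | github.com/chengcz/bixcode-snippets | vcf/EffSelector.py | __flag_older_version
-- ===== SOURCE A (Python) =====
-- def __flag_older_version(refids):
--     VERS = {}
--     for refid in refids:
--         ref, _, vers = refid.partition('.')
--         VERS.setdefault(ref, []).append((
--             refid, int(vers) if vers.isdigit() else 1
--         ))
--     delrefids = []
--     for _, refids in VERS.items():
--         *tmp, _ = sorted(refids, key=lambda m: m[1])
--         delrefids.extend(tmp)
--     return tuple([x[0] for x in delrefids])
-- ===== SOURCE B (Python) =====
-- def __flag_older_version(refids):
--     # One flat pass: tag each refid with (version, group index by first appearance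
--     # of its prefix), one global stable sort by (group, version), then a single
--     # zip-with-next sweep that emits every element not at the end of its group run.
--     groups = {}
--     flat = []
--     for refid in refids:
--         ref, _, vers = refid.partition('.')
--         if ref not in groups:
--             groups[ref] = len(groups)
--         flat.append((refid, int(vers) if vers.isdigit() else 1, groups[ref]))
--     ordered = sorted(flat, key=lambda t: (t[2], t[1]))
--     return tuple(t[0] for t, u in zip(ordered, ordered[1:]) if t[2] == u[2])
-- ===== Notes on version B (the rewrite author's own statement) =====
-- stated objective: alternative
-- what changed: Instead of grouping refids into per-prefix lists and sorting each group separately, B tags every refid with (first-appearance group index, version) in one pass, performs a single global stable sort by that pair, and emits non-run-final elements in one zip-with-next sweep over the sorted flat list.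
import Mathlib
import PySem

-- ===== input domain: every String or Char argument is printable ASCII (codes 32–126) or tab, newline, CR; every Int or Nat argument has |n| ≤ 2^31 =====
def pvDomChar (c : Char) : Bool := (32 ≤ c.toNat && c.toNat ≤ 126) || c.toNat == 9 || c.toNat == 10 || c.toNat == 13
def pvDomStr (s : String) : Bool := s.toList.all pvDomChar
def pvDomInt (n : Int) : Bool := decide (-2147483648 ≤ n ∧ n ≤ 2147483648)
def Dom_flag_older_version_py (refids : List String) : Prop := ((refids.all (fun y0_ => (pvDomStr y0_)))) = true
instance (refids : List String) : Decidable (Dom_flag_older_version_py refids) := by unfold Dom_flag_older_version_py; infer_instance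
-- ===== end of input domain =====

-- B replaces A's per-prefix grouping + per-group sort by one global stable sort of a flat
-- (refid, version, group-index) list followed by a single zip-with-next sweep (objective: alternative).

-- shared helper: exact hand port of Python's  s.partition('.')  (PySem has no partition):
-- first '.' splits s into (head, '.', tail); if there is none, (s, '', '').  Both Pythons call it.
def pvPartitionDot (s : String) : String × String × String :=
  let cs := s.toList
  let i := PySem.Chars.find cs ['.']
  if i = -1 then (s, "", "")
  else (String.ofList (cs.take i.toNat), ".", String.ofList (cs.drop (i.toNat + 1)))

-- ===== PORT A =====
def flag_older_version_py (refids : List String) : List String :=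
  -- VERS = {};  for refid: ref,_,vers = refid.partition('.'); VERS.setdefault(ref, []).append((refid, int(vers) if vers.isdigit() else 1))
  -- (setdefault-then-append == modify with default [])
  let VERS : PySem.Dict String (List (String × Int)) :=
    refids.foldl (fun d refid =>
      let p := pvPartitionDot refid
      d.modify p.1 []
        (fun l => l ++ [(refid, if PySem.Str.strIsdigit p.2.2 then (PySem.Int.ofStr? p.2.2).getD 0 else 1)]))
      PySem.Dict.empty
  -- for _, refids in VERS.items(): *tmp, _ = sorted(refids, key=m[1]); delrefids.extend(tmp)
  -- ('*tmp, _ = l' is l without its last element; every group is nonempty, so Python never raises here)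
  let delrefids : List (String × Int) :=
    VERS.items.foldl (fun acc kv =>
      acc ++ (PySem.List.sorted kv.2 (fun m => m.2) false).dropLast) []
  -- tuple([x[0] for x in delrefids])
  delrefids.map (fun x => x.1)

-- ===== PORT B =====
def flag_older_version_py_alt (refids : List String) : List String :=
  -- one pass: groups[ref] = first-appearance index; flat gets (refid, version, group index)
  let st : PySem.Dict String Int × List (String × Int × Int) :=
    refids.foldl (fun st refid =>
      let p := pvPartitionDot refid
      let groups := if st.1.contains p.1 then st.1 else st.1.insert p.1 (st.1.size : Int)
      (groups, st.2 ++ [(refid,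
        (if PySem.Str.strIsdigit p.2.2 then (PySem.Int.ofStr? p.2.2).getD 0 else 1),
        groups.getD p.1 0)]))
      (PySem.Dict.empty, [])
  -- ordered = sorted(flat, key=lambda t: (t[2], t[1]))
  let ordered := PySem.List.sorted2 st.2 (fun t => t.2.2) (fun t => t.2.1) false
  -- tuple(t[0] for t, u in zip(ordered, ordered[1:]) if t[2] == u[2])
  ((ordered.zip (PySem.List.slice ordered (some 1) none)).filter
      (fun p => p.1.2.2 == p.2.2.2)).map (fun p => p.1.1)

-- ===== PRECONDITION & SPEC =====
def Spec_flag_older_version_py (refids : List String) (out : List String) : Prop := out = flag_older_version_py_alt refids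
instance (refids : List String) (out : List String) : Decidable (Spec_flag_older_version_py refids out) := by unfold Spec_flag_older_version_py; infer_instance

-- ===== CLAIM (what is proved, stated in full; the proofs are below) =====
def Claim_equal_flag_older_version_py : Prop := ∀ (refids : List String), Dom_flag_older_version_py refids → Spec_flag_older_version_py refids (flag_older_version_py refids)

-- ===== LEMMAS AND PROOFS =====

-- proof-side abbreviations for the values both ports compute per refid
def pvKey (r : String) : String := (pvPartitionDot r).1
def pvVer (r : String) : Int :=
  if PySem.Str.strIsdigit (pvPartitionDot r).2.2 then (PySem.Int.ofStr? (pvPartitionDot r).2.2).getD 0 else 1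
def pvKs (xs : List String) : List String := PySem.List.dedup (xs.map pvKey)
def pvGrp (xs : List String) (k : String) : List String := xs.filter (fun r => pvKey r == k)
-- the common normal form both ports are reduced to: per first-seen prefix, the
-- stably-version-sorted group without its last element
def pvC (xs : List String) : List String :=
  (pvKs xs).flatMap (fun k => (PySem.List.sorted (pvGrp xs k) pvVer false).dropLast)

theorem pvKs_snoc (xs : List String) (r : String) :
    pvKs (xs ++ [r]) = if pvKey r ∈ pvKs xs then pvKs xs else pvKs xs ++ [pvKey r] := by
  have h1 : pvKs (xs ++ [r]) = PySem.Set.add (pvKs xs) (pvKey r) := by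
    simp [pvKs, PySem.List.dedup, PySem.Set.ofList, List.foldl_append]
  by_cases hm : pvKey r ∈ pvKs xs
  · rw [h1, PySem.Set.add_of_mem hm, if_pos hm]
  · rw [h1, PySem.Set.add_of_not_mem hm, if_neg hm]

theorem pvGrp_snoc (xs : List String) (r : String) (k : String) :
    pvGrp (xs ++ [r]) k = pvGrp xs k ++ if pvKey r = k then [r] else [] := by
  simp only [pvGrp, List.filter_append, List.filter_singleton]
  by_cases h : pvKey r = k
  · simp [h]
  · have hb : (pvKey r == k) = false := by simpa using h
    simp [h, hb]

theorem pvGrp_nil_of_not_mem (xs : List String) (k : String) (h : k ∉ pvKs xs) :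
    pvGrp xs k = [] := by
  simp only [pvGrp]
  rw [List.filter_eq_nil_iff]
  intro r hr hbeq
  exact h (by
    rw [pvKs, PySem.List.mem_dedup]
    exact (beq_iff_eq.mp hbeq) ▸ List.mem_map_of_mem hr)

theorem pvGet?_mk_map {ν : Type} (ks : List String) (f : String → ν) (k : String) (h : k ∈ ks) :
    (PySem.Dict.mk (ks.map (fun a => (a, f a)))).get? k = some (f k) := by
  induction ks with
  | nil => simp at h
  | cons a t ih =>
    simp only [List.map_cons, PySem.Dict.get?_mk_cons]
    by_cases hk : a = k
    · simp [hk]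
    · simp only [beq_iff_eq, if_neg hk]
      exact ih (by rcases List.mem_cons.mp h with h' | h'; exact absurd h'.symm hk; exact h')

theorem pvGet?_mk_map_not_mem {ν : Type} (ks : List String) (f : String → ν) (k : String) (h : k ∉ ks) :
    (PySem.Dict.mk (ks.map (fun a => (a, f a)))).get? k = none := by
  induction ks with
  | nil => simp [PySem.Dict.get?]
  | cons a t ih =>
    simp only [List.map_cons, PySem.Dict.get?_mk_cons]
    have ha : a ≠ k := fun e => h (e ▸ List.mem_cons_self)
    simp only [beq_iff_eq, if_neg ha]
    exact ih (fun e => h (List.mem_cons_of_mem _ e))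

theorem pvGetD_mk_map {ν : Type} (ks : List String) (f : String → ν) (k : String) (d : ν) (h : k ∈ ks) :
    (PySem.Dict.mk (ks.map (fun a => (a, f a)))).getD k d = f k := by
  simp [PySem.Dict.getD, pvGet?_mk_map ks f k h]

theorem pvGetD_mk_map_not_mem {ν : Type} (ks : List String) (f : String → ν) (k : String) (d : ν) (h : k ∉ ks) :
    (PySem.Dict.mk (ks.map (fun a => (a, f a)))).getD k d = d := by
  simp [PySem.Dict.getD, pvGet?_mk_map_not_mem ks f k h]

theorem pvContains_mk_map {ν : Type} (ks : List String) (f : String → ν) (k : String) :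
    (PySem.Dict.mk (ks.map (fun a => (a, f a)))).contains k = decide (k ∈ ks) := by
  rw [PySem.Dict.contains_mk, List.any_map]
  by_cases hm : k ∈ ks
  · simp only [hm, decide_true]
    rw [List.any_eq_true]
    exact ⟨k, hm, by simp⟩
  · simp only [hm, decide_false]
    rw [List.any_eq_false]
    intro a ha
    simp only [Function.comp_apply, beq_iff_eq]
    exact fun e => hm (e ▸ ha)

-- ---------- A side: the dict after the grouping loop ----------

theorem pvDictA_items (xs : List String) :
    (xs.foldl (fun d refid => PySem.Dict.modify d (pvPartitionDot refid).1 []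
        (fun l => l ++ [(refid, if PySem.Str.strIsdigit (pvPartitionDot refid).2.2
                                then (PySem.Int.ofStr? (pvPartitionDot refid).2.2).getD 0 else 1)]))
        (PySem.Dict.empty : PySem.Dict String (List (String × Int)))).items
      = (pvKs xs).map (fun k => (k, (pvGrp xs k).map (fun r => (r, pvVer r)))) := by
  induction xs using List.reverseRecOn with
  | nil => simp [pvKs, pvGrp, PySem.List.dedup, PySem.Set.ofList, PySem.Dict.empty]
  | append_singleton xs r ih =>
    rw [List.foldl_append, List.foldl_cons, List.foldl_nil]
    set D := xs.foldl (fun d refid => PySem.Dict.modify d (pvPartitionDot refid).1 []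
        (fun l => l ++ [(refid, if PySem.Str.strIsdigit (pvPartitionDot refid).2.2
                                then (PySem.Int.ofStr? (pvPartitionDot refid).2.2).getD 0 else 1)]))
        (PySem.Dict.empty : PySem.Dict String (List (String × Int))) with hDdef
    have hD : D = PySem.Dict.mk ((pvKs xs).map (fun k => (k, (pvGrp xs k).map (fun r => (r, pvVer r))))) :=
      PySem.Dict.ext ih
    have hkey : (pvPartitionDot r).1 = pvKey r := rfl
    have hver : (if PySem.Str.strIsdigit (pvPartitionDot r).2.2
        then (PySem.Int.ofStr? (pvPartitionDot r).2.2).getD 0 else 1) = pvVer r := rfl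
    rw [hD, PySem.Dict.modify, hkey, hver]
    by_cases hm : pvKey r ∈ pvKs xs
    · have hc : (PySem.Dict.mk ((pvKs xs).map (fun k => (k, (pvGrp xs k).map (fun r => (r, pvVer r)))))).contains (pvKey r) = true := by
        rw [pvContains_mk_map]; simpa using hm
      rw [PySem.Dict.items_insert_of_contains _ _ hc,
          pvGetD_mk_map _ _ _ _ hm, pvKs_snoc, if_pos hm, List.map_map]
      apply List.map_congr_left
      intro k hk
      by_cases hkk : k = pvKey r
      · subst hkk
        simp [pvGrp_snoc, beq_iff_eq]
      · have hb : (k == pvKey r) = false := by simpa using hkk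
        simp [Function.comp, hb, pvGrp_snoc, Ne.symm hkk]
    · have hc : (PySem.Dict.mk ((pvKs xs).map (fun k => (k, (pvGrp xs k).map (fun r => (r, pvVer r)))))).contains (pvKey r) = false := by
        rw [pvContains_mk_map]; simpa using hm
      rw [PySem.Dict.items_insert_of_not_contains _ _ hc,
          pvGetD_mk_map_not_mem _ _ _ _ hm, pvKs_snoc, if_neg hm, List.map_append]
      congr 1
      · apply List.map_congr_left
        intro k hk
        have hkk : pvKey r ≠ k := fun e => hm (e ▸ hk)
        simp [pvGrp_snoc, hkk]
      · simp [pvGrp_snoc, pvGrp_nil_of_not_mem xs _ hm]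

-- ---------- stable-sort toolkit ----------

def pvLex {α : Type} (k1 k2 : α → Int) : α → α → Bool :=
  fun a b => decide (k1 a < k1 b) || (!decide (k1 b < k1 a) && decide (k2 a < k2 b))

theorem pvSorted_snoc {α : Type} (l : List α) (x : α) (key : α → Int) :
    PySem.List.sorted (l ++ [x]) key false
      = PySem.List.insertBy (fun a b => decide (key a < key b)) x (PySem.List.sorted l key false) := by
  rw [PySem.List.sorted_eq_foldl_insertBy, PySem.List.sorted_eq_foldl_insertBy, List.foldl_append,
      List.foldl_cons, List.foldl_nil]

theorem pvSorted2_snoc {α : Type} (l : List α) (x : α) (k1 k2 : α → Int) :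
    PySem.List.sorted2 (l ++ [x]) k1 k2 false
      = PySem.List.insertBy (pvLex k1 k2) x (PySem.List.sorted2 l k1 k2 false) := by
  simp only [PySem.List.sorted2, List.foldl_append, List.foldl_cons, List.foldl_nil]
  rfl

theorem pvInsertBy_append_left {α : Type} (before : α → α → Bool) (x : α) (as bs : List α)
    (h : ∀ a ∈ as, before x a = false) :
    PySem.List.insertBy before x (as ++ bs) = as ++ PySem.List.insertBy before x bs := by
  induction as with
  | nil => simp
  | cons a t ih =>
    have ha : before x a = false := h a List.mem_cons_self
    simp only [List.cons_append, PySem.List.insertBy, ha]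
    simp only [Bool.false_eq_true, if_false]
    rw [ih (fun a' ha' => h a' (List.mem_cons_of_mem _ ha'))]

theorem pvInsertBy_append_right {α : Type} (before : α → α → Bool) (x : α) (as bs : List α)
    (h : ∀ b ∈ bs, before x b = true) :
    PySem.List.insertBy before x (as ++ bs) = PySem.List.insertBy before x as ++ bs := by
  induction as with
  | nil =>
    cases bs with
    | nil => simp [PySem.List.insertBy]
    | cons b t =>
      have hb : before x b = true := h b List.mem_cons_self
      simp [PySem.List.insertBy, hb]
  | cons a t ih =>
    by_cases ha : before x a = true
    · simp [PySem.List.insertBy, ha]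
    · simp only [Bool.not_eq_true] at ha
      simp only [List.cons_append, PySem.List.insertBy, ha]
      simp only [Bool.false_eq_true, if_false]
      rw [ih, List.cons_append]

theorem pvInsertBy_congr {α : Type} (before before' : α → α → Bool) (x : α) (l : List α)
    (h : ∀ y ∈ l, before x y = before' x y) :
    PySem.List.insertBy before x l = PySem.List.insertBy before' x l := by
  induction l with
  | nil => rfl
  | cons a t ih =>
    have ha := h a List.mem_cons_self
    simp only [PySem.List.insertBy, ha]
    by_cases h' : before' x a = true
    · simp [h']
    · simp only [Bool.not_eq_true] at h'
      simp only [h', Bool.false_eq_true, if_false]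
      rw [ih (fun y hy => h y (List.mem_cons_of_mem _ hy))]

theorem pvMem_block {α : Type} (ys : List α) (k1 k2 : α → Int) (i : Int) (y : α)
    (hy : y ∈ PySem.List.sorted (ys.filter (fun z => k1 z == i)) k2 false) : k1 y = i := by
  rw [PySem.List.mem_sorted, List.mem_filter] at hy
  exact beq_iff_eq.mp hy.2

-- one global stable sort by (group, version) = per-group stable sorts by version,
-- concatenated in increasing group order
theorem pvSorted2_blocks {α : Type} (ys : List α) (k1 k2 : α → Int) (is : List Int)
    (hinc : is.Pairwise (· < ·)) (hcov : ∀ y ∈ ys, k1 y ∈ is) :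
    PySem.List.sorted2 ys k1 k2 false
      = is.flatMap (fun i => PySem.List.sorted (ys.filter (fun y => k1 y == i)) k2 false) := by
  induction ys using List.reverseRecOn with
  | nil => simp [PySem.List.sorted2, PySem.List.sorted]
  | append_singleton ys x ih =>
    have hcov' : ∀ y ∈ ys, k1 y ∈ is := fun y hy => hcov y (List.mem_append_left _ hy)
    have hx : k1 x ∈ is := hcov x (List.mem_append_right _ List.mem_cons_self)
    obtain ⟨as, bs, his⟩ := List.append_of_mem hx
    subst his
    rw [List.pairwise_append] at hinc
    obtain ⟨hA, hB, hAB⟩ := hinc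
    rw [List.pairwise_cons] at hB
    obtain ⟨hBgt, _⟩ := hB
    have hAlt : ∀ a ∈ as, a < k1 x := fun a ha => hAB a ha _ List.mem_cons_self
    rw [pvSorted2_snoc, ih hcov']
    rw [List.flatMap_append, List.flatMap_cons]
    rw [pvInsertBy_append_left _ _ _ _ (by
      intro y hy
      rw [List.mem_flatMap] at hy
      obtain ⟨a, ha, hya⟩ := hy
      have hk : k1 y = a := pvMem_block ys k1 k2 a y hya
      have halt := hAlt a ha
      simp only [pvLex, hk]
      simp only [Bool.or_eq_false_iff, Bool.and_eq_false_iff]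
      constructor
      · simpa using by omega
      · left; simpa using by omega)]
    rw [pvInsertBy_append_right _ _ _ _ (by
      intro y hy
      rw [List.mem_flatMap] at hy
      obtain ⟨b, hb, hyb⟩ := hy
      have hk : k1 y = b := pvMem_block ys k1 k2 b y hyb
      have hbgt := hBgt b hb
      simp only [pvLex, hk, Bool.or_eq_true_iff]
      left; simpa using hbgt)]
    rw [pvInsertBy_congr (pvLex k1 k2) (fun a b => decide (k2 a < k2 b)) x _ (by
      intro y hy
      have hk : k1 y = k1 x := pvMem_block ys k1 k2 (k1 x) y hy
      simp [pvLex, hk])]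
    rw [List.flatMap_append, List.flatMap_cons]
    have hne_as : ∀ a ∈ as, (ys ++ [x]).filter (fun y => k1 y == a) = ys.filter (fun y => k1 y == a) := by
      intro a ha
      rw [List.filter_append, List.filter_singleton]
      have hf : (k1 x == a) = false := by
        have := hAlt a ha; simp only [beq_eq_false_iff_ne, ne_eq]; omega
      simp [hf]
    have hne_bs : ∀ b ∈ bs, (ys ++ [x]).filter (fun y => k1 y == b) = ys.filter (fun y => k1 y == b) := by
      intro b hb
      rw [List.filter_append, List.filter_singleton]
      have hf : (k1 x == b) = false := by
        have := hBgt b hb; simp only [beq_eq_false_iff_ne, ne_eq]; omega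
      simp [hf]
    have hmid : (ys ++ [x]).filter (fun y => k1 y == k1 x) = ys.filter (fun y => k1 y == k1 x) ++ [x] := by
      rw [List.filter_append, List.filter_singleton]
      simp
    congr 1
    · exact (List.flatMap_congr (fun a ha => by rw [hne_as a ha])).symm
    · congr 1
      · rw [hmid, pvSorted_snoc]
      · exact (List.flatMap_congr (fun b hb => by rw [hne_bs b hb])).symm

-- ---------- the zip-with-next sweep ----------

def pvPass : List (String × Int × Int) → List String
  | a :: b :: t => (if a.2.2 == b.2.2 then [a.1] else []) ++ pvPass (b :: t)
  | _ => []

theorem pvZip_eq_pass (S : List (String × Int × Int)) :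
    ((S.zip (S.drop 1)).filter (fun p => p.1.2.2 == p.2.2.2)).map (fun p => p.1.1) = pvPass S := by
  induction S with
  | nil => simp [pvPass]
  | cons a t ih =>
    cases t with
    | nil => simp [pvPass]
    | cons b t' =>
      have hz : (a :: b :: t').zip ((a :: b :: t').drop 1)
          = (a, b) :: ((b :: t').zip ((b :: t').drop 1)) := by simp
      rw [hz, List.filter_cons]
      by_cases h : (a.2.2 == b.2.2) = true
      · rw [if_pos h, List.map_cons, ih]
        show a.1 :: pvPass (b :: t') = pvPass (a :: b :: t')
        simp [pvPass, h]
      · rw [if_neg h, ih]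
        have hf : (a.2.2 == b.2.2) = false := by
          cases hb : (a.2.2 == b.2.2) with
          | false => rfl
          | true => exact absurd hb h
        simp [pvPass, hf]

theorem pvPass_block (l : List (String × Int × Int)) (i : Int) (S' : List (String × Int × Int))
    (hl : ∀ a ∈ l, a.2.2 = i) (hS' : ∀ b ∈ S', b.2.2 ≠ i) :
    pvPass (l ++ S') = l.dropLast.map (fun a => a.1) ++ pvPass S' := by
  induction l with
  | nil => simp
  | cons a t ih =>
    cases t with
    | nil =>
      cases S' with
      | nil => simp [pvPass]
      | cons b u =>
        have hb : b.2.2 ≠ i := hS' b List.mem_cons_self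
        have ha : a.2.2 = i := hl a List.mem_cons_self
        have hf : (a.2.2 == b.2.2) = false := by
          simp only [beq_eq_false_iff_ne, ne_eq, ha]
          exact fun e => hb e.symm
        simp [pvPass, hf]
    | cons c t' =>
      have ha : a.2.2 = i := hl a List.mem_cons_self
      have hcc : c.2.2 = i := hl c (List.mem_cons_of_mem _ List.mem_cons_self)
      have ht : (a.2.2 == c.2.2) = true := by simp [ha, hcc]
      have ih' := ih (fun y hy => hl y (List.mem_cons_of_mem _ hy))
      simp only [List.cons_append] at ih' ⊢
      simp only [pvPass, ht, if_true]
      rw [ih']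
      simp [List.dropLast_cons₂]

theorem pvPass_flatMap (is : List Int) (F : Int → List (String × Int × Int))
    (hinc : is.Pairwise (· < ·)) (hF : ∀ i ∈ is, ∀ a ∈ F i, a.2.2 = i) :
    pvPass (is.flatMap F) = is.flatMap (fun i => (F i).dropLast.map (fun a => a.1)) := by
  induction is with
  | nil => simp [pvPass]
  | cons i t ih =>
    rw [List.pairwise_cons] at hinc
    obtain ⟨hgt, htail⟩ := hinc
    rw [List.flatMap_cons, List.flatMap_cons]
    rw [pvPass_block (F i) i (t.flatMap F)
      (hF i List.mem_cons_self)
      (by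
        intro b hb
        rw [List.mem_flatMap] at hb
        obtain ⟨j, hj, hbj⟩ := hb
        have h1 := hF j (List.mem_cons_of_mem _ hj) b hbj
        have h2 := hgt j hj
        omega)]
    rw [ih htail (fun j hj => hF j (List.mem_cons_of_mem _ hj))]

-- ---------- B side: the state after the single pass ----------

theorem pvGetD_mk_zipIdx (ks : List String) (k : String) (hnd : ks.Nodup) (n : Nat) (h : k ∈ ks) :
    (PySem.Dict.mk ((ks.zipIdx n).map (fun p => (p.1, ((p.2 : Nat) : Int))))).getD k 0
      = ((n + ks.idxOf k : Nat) : Int) := by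
  induction ks generalizing n with
  | nil => simp at h
  | cons a t ih =>
    rw [List.zipIdx_cons, List.map_cons]
    by_cases hk : a = k
    · subst hk
      simp [PySem.Dict.getD, PySem.Dict.get?_mk_cons, List.idxOf_cons_self]
    · have hmem : k ∈ t := by rcases List.mem_cons.mp h with h' | h'; exact absurd h'.symm hk; exact h'
      have hba : (a == k) = false := by simpa using hk
      simp only [PySem.Dict.getD, PySem.Dict.get?_mk_cons, hba, Bool.false_eq_true, if_false]
      have ihr := ih hnd.of_cons (n + 1) hmem
      simp only [PySem.Dict.getD] at ihr
      rw [ihr]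
      have hidx : (a :: t).idxOf k = t.idxOf k + 1 := by
        simp [List.idxOf_cons, hba]
      rw [hidx]
      push_cast
      ring

def pvStepB (st : PySem.Dict String Int × List (String × Int × Int)) (refid : String) :
    PySem.Dict String Int × List (String × Int × Int) :=
  let p := pvPartitionDot refid
  let groups := if st.1.contains p.1 then st.1 else st.1.insert p.1 (st.1.size : Int)
  (groups, st.2 ++ [(refid,
    (if PySem.Str.strIsdigit p.2.2 then (PySem.Int.ofStr? p.2.2).getD 0 else 1),
    groups.getD p.1 0)])

theorem pvStB_spec (xs : List String) :
    (xs.foldl pvStepB (PySem.Dict.empty, [])).1.items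
        = (pvKs xs).zipIdx.map (fun p => (p.1, ((p.2 : Nat) : Int)))
      ∧ (xs.foldl pvStepB (PySem.Dict.empty, [])).2
        = xs.map (fun r => (r, pvVer r, (((pvKs xs).idxOf (pvKey r) : Nat) : Int))) := by
  induction xs using List.reverseRecOn with
  | nil => constructor <;> simp [pvKs, PySem.List.dedup, PySem.Set.ofList, PySem.Dict.empty]
  | append_singleton xs r ih =>
    obtain ⟨ihG, ihF⟩ := ih
    rw [List.foldl_append, List.foldl_cons, List.foldl_nil]
    set st := xs.foldl pvStepB (PySem.Dict.empty, []) with hst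
    have hG : st.1 = PySem.Dict.mk ((pvKs xs).zipIdx.map (fun p => (p.1, ((p.2 : Nat) : Int)))) :=
      PySem.Dict.ext ihG
    have hnd : (pvKs xs).Nodup := PySem.List.nodup_dedup _
    have hkey : (pvPartitionDot r).1 = pvKey r := rfl
    have hcont : st.1.contains (pvKey r) = decide (pvKey r ∈ pvKs xs) := by
      rw [hG, PySem.Dict.contains_mk, List.any_map]
      by_cases hm' : pvKey r ∈ pvKs xs
      · simp only [hm', decide_true]
        rw [List.any_eq_true]
        have hmm : pvKey r ∈ ((pvKs xs).zipIdx.map Prod.fst : List String) := by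
          rw [List.zipIdx_map_fst]; exact hm'
        obtain ⟨p, hp, hpe⟩ := List.mem_map.mp hmm
        exact ⟨p, hp, by simp [hpe]⟩
      · simp only [hm', decide_false]
        rw [List.any_eq_false]
        intro p hp
        simp only [Function.comp_apply, beq_iff_eq]
        intro e
        apply hm'
        have h1 : p.1 ∈ ((pvKs xs).zipIdx.map Prod.fst : List String) := List.mem_map_of_mem hp
        rw [List.zipIdx_map_fst] at h1
        exact e ▸ h1
    by_cases hm : pvKey r ∈ pvKs xs
    · have hc : st.1.contains (pvPartitionDot r).1 = true := by rw [hkey, hcont]; simpa using hm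
      have hks : pvKs (xs ++ [r]) = pvKs xs := by rw [pvKs_snoc, if_pos hm]
      have hgetd : st.1.getD (pvPartitionDot r).1 0 = (((pvKs xs).idxOf (pvKey r) : Nat) : Int) := by
        rw [hkey, hG]
        have hz := pvGetD_mk_zipIdx (pvKs xs) (pvKey r) hnd 0 hm
        simpa using hz
      have hstep : pvStepB st r
          = (st.1, st.2 ++ [(r, pvVer r, (((pvKs xs).idxOf (pvKey r) : Nat) : Int))]) := by
        simp only [pvStepB]
        rw [hc]
        simp only [if_true]
        rw [hgetd]
        rfl
      have hstep1 : (pvStepB st r).1 = st.1 := by rw [hstep]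
      have hstep2 : (pvStepB st r).2
          = st.2 ++ [(r, pvVer r, (((pvKs xs).idxOf (pvKey r) : Nat) : Int))] := by rw [hstep]
      constructor
      · rw [hstep1, hks]; exact ihG
      · rw [hstep2, hks, List.map_append, ← ihF]
        rfl
    · have hc : st.1.contains (pvPartitionDot r).1 = false := by rw [hkey, hcont]; simpa using hm
      have hks : pvKs (xs ++ [r]) = pvKs xs ++ [pvKey r] := by rw [pvKs_snoc, if_neg hm]
      have hsize : st.1.size = (pvKs xs).length := by
        rw [PySem.Dict.size, ihG]
        simp
      have hstep : pvStepB st r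
          = (st.1.insert (pvKey r) (((pvKs xs).length : Nat) : Int),
             st.2 ++ [(r, pvVer r, (((pvKs xs).length : Nat) : Int))]) := by
        simp only [pvStepB]
        rw [hc]
        simp only [Bool.false_eq_true, if_false]
        rw [hkey, hsize, PySem.Dict.getD_insert_self]
        rfl
      have hstep1 : (pvStepB st r).1 = st.1.insert (pvKey r) (((pvKs xs).length : Nat) : Int) := by
        rw [hstep]
      have hstep2 : (pvStepB st r).2
          = st.2 ++ [(r, pvVer r, (((pvKs xs).length : Nat) : Int))] := by rw [hstep]
      constructor
      · rw [hstep1, hks]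
        rw [PySem.Dict.items_insert_of_not_contains _ _ (hkey ▸ hc), ihG]
        rw [List.zipIdx_append, List.zipIdx_cons, List.map_append]
        simp
      · rw [hstep2, hks, List.map_append]
        congr 1
        · rw [ihF]
          apply List.map_congr_left
          intro y hy
          have hmem : pvKey y ∈ pvKs xs := by
            rw [pvKs, PySem.List.mem_dedup]
            exact List.mem_map_of_mem hy
          rw [List.idxOf_append_of_mem hmem]
        · have hidx : (pvKs xs ++ [pvKey r]).idxOf (pvKey r) = (pvKs xs).length := by
            rw [List.idxOf_append_of_notMem hm]
            simp
          simp [hidx]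

-- ---------- assembling both sides ----------

theorem pvSorted_map_emb {α β : Type} (l : List β) (f : β → α) (k : α → Int) (k' : β → Int)
    (h : ∀ b, k (f b) = k' b) :
    PySem.List.sorted (l.map f) k false = (PySem.List.sorted l k' false).map f := by
  induction l using List.reverseRecOn with
  | nil => simp [PySem.List.sorted]
  | append_singleton l x ih =>
    rw [List.map_append, List.map_cons, List.map_nil, pvSorted_snoc, pvSorted_snoc, ih]
    generalize PySem.List.sorted l k' false = m
    induction m with
    | nil => simp [PySem.List.insertBy]
    | cons a t iht =>
      simp only [List.map_cons, PySem.List.insertBy, h]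
      by_cases hc : decide (k' x < k' a) = true
      · simp [hc]
      · simp only [Bool.not_eq_true] at hc
        simp only [hc, Bool.false_eq_true, if_false, List.map_cons]
        rw [iht]

theorem pvRange_flatMap (ks : List String) (G : Nat → List String) (h : String → List String)
    (hG : ∀ n (hn : n < ks.length), G n = h ks[n]) :
    (List.range ks.length).flatMap G = ks.flatMap h := by
  induction ks generalizing G with
  | nil => simp
  | cons a t ih =>
    rw [List.length_cons, List.range_succ_eq_map, List.flatMap_cons, List.flatMap_cons]
    congr 1
    · exact hG 0 (by simp)
    · rw [List.flatMap_map]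
      exact ih (fun n => G (n + 1)) (fun n hn => by
        have := hG (n + 1) (by simpa using Nat.succ_lt_succ hn)
        simpa using this)

theorem pvA_eq_pvC (xs : List String) : flag_older_version_py xs = pvC xs := by
  rw [flag_older_version_py]
  simp only []
  rw [pvDictA_items]
  rw [PySem.List.foldl_append_eq_flatMap, List.nil_append, List.map_flatMap, List.flatMap_map]
  rw [pvC]
  apply List.flatMap_congr
  intro k hk
  rw [pvSorted_map_emb (pvGrp xs k) (fun r => (r, pvVer r)) (fun m => m.2) pvVer (fun b => rfl)]
  rw [← List.map_dropLast, List.map_map]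
  simp [Function.comp_def]

theorem pvB_eq_pvC (xs : List String) : flag_older_version_py_alt xs = pvC xs := by
  rw [flag_older_version_py_alt]
  simp only []
  have hstep : (fun (st : PySem.Dict String Int × List (String × Int × Int)) refid =>
      ((if st.1.contains (pvPartitionDot refid).1 then st.1
        else st.1.insert (pvPartitionDot refid).1 (st.1.size : Int)),
       st.2 ++ [(refid,
         (if PySem.Str.strIsdigit (pvPartitionDot refid).2.2
          then (PySem.Int.ofStr? (pvPartitionDot refid).2.2).getD 0 else 1),
         (if st.1.contains (pvPartitionDot refid).1 then st.1
          else st.1.insert (pvPartitionDot refid).1 (st.1.size : Int)).getD (pvPartitionDot refid).1 0)])) = pvStepB := by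
    funext st refid
    rfl
  rw [hstep]
  obtain ⟨-, hflat⟩ := pvStB_spec xs
  rw [hflat]
  set m := (pvKs xs).length with hm
  set g : String → String × Int × Int :=
    fun r => (r, pvVer r, (((pvKs xs).idxOf (pvKey r) : Nat) : Int)) with hg
  have hnd : (pvKs xs).Nodup := PySem.List.nodup_dedup _
  have hmemks : ∀ y ∈ xs, pvKey y ∈ pvKs xs := fun y hy => by
    rw [pvKs, PySem.List.mem_dedup]; exact List.mem_map_of_mem hy
  have hpw : ((List.range m).map (fun n => ((n : Nat) : Int))).Pairwise (· < ·) :=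
    (List.pairwise_map).mpr (List.pairwise_lt_range.imp (fun hab => by exact_mod_cast hab))
  have hblocks : PySem.List.sorted2 (xs.map g) (fun t => t.2.2) (fun t => t.2.1) false
      = ((List.range m).map (fun n => ((n : Nat) : Int))).flatMap
          (fun i => PySem.List.sorted ((xs.map g).filter (fun y => y.2.2 == i)) (fun t => t.2.1) false) := by
    apply pvSorted2_blocks _ _ _ _ hpw
    intro y hy
    obtain ⟨r, hr, hrg⟩ := List.mem_map.mp hy
    subst hrg
    show (((pvKs xs).idxOf (pvKey r) : Nat) : Int) ∈ _
    exact List.mem_map_of_mem (List.mem_range.mpr (List.idxOf_lt_length_of_mem (hmemks r hr)))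
  rw [hblocks]
  rw [PySem.List.slice_from _ (by norm_num : (0:Int) ≤ 1)]
  simp only [Int.toNat_one]
  rw [pvZip_eq_pass]
  rw [pvPass_flatMap _ _ hpw
    (fun i _ a ha => pvMem_block (xs.map g) (fun t => t.2.2) (fun t => t.2.1) i a ha)]
  rw [List.flatMap_map]
  rw [pvC]
  apply pvRange_flatMap
  intro n hn
  have hfilter : (xs.map g).filter (fun y => y.2.2 == ((n : Nat) : Int))
      = (xs.filter (fun r => pvKey r == (pvKs xs)[n])).map g := by
    rw [List.filter_map]
    congr 1
    apply List.filter_congr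
    intro r hr
    simp only [Function.comp_apply, hg]
    have hmem := hmemks r hr
    by_cases he : (pvKs xs).idxOf (pvKey r) = n
    · subst he
      have hlt : (pvKs xs).idxOf (pvKey r) < (pvKs xs).length := List.idxOf_lt_length_of_mem hmem
      simp [List.getElem_idxOf hlt]
    · have h1 : ((((pvKs xs).idxOf (pvKey r) : Nat) : Int) == ((n : Nat) : Int)) = false := by
        simp only [beq_eq_false_iff_ne, ne_eq]
        exact_mod_cast he
      have h2 : (pvKey r == (pvKs xs)[n]) = false := by
        simp only [beq_eq_false_iff_ne, ne_eq]
        intro e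
        exact he (by rw [e]; exact hnd.idxOf_getElem n hn)
      simp [h1, h2]
  rw [hfilter]
  rw [pvSorted_map_emb (xs.filter (fun r => pvKey r == (pvKs xs)[n])) g
    (fun t => t.2.1) pvVer (fun b => rfl)]
  rw [← List.map_dropLast, List.map_map]
  simp only [pvGrp]
  have : ((fun a => a.1) ∘ g) = fun r => r := by funext r; rfl
  rw [this, List.map_id']

-- ===== VERDICT (by name: the statement is the Claim_ definition above) =====
theorem flag_older_version_py_spec : Claim_equal_flag_older_version_py := by
  intro refids _
  show flag_older_version_py refids = flag_older_version_py_alt refids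
  rw [pvA_eq_pvC, pvB_eq_pvC]
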